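-- pv_equiv track=rewrite | github.com/sOrzada/MRexcite_Software | MRexcite_Main.py | _calcBackground
-- ===== SOURCE A (Python) =====
-- def _calcBackground(mode):
--     '''Function to calculate the background color for amplifier mode'''
--     numberOfSamples = len(mode)
--     if numberOfSamples == 1:
--         return 0, mode
--
--     currentValue = -1
--     switch_pos=[]
--     value=[]
--     for a in range(numberOfSamples):
--         if mode[a] != currentValue:
--             switch_pos.append(a)
--             value.append(mode[a])
--             currentValue = mode[a]
--     switch_pos.append(numberOfSamples-1) #include maximum number of samples as end point for areas.
--     return switch_pos,value
-- ===== SOURCE B (Python) =====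
-- def _calcBackground(mode):
--     '''Function to calculate the background color for amplifier mode'''
--     n = len(mode)
--     if n == 1:
--         return 0, mode
--     # Run-length encode [-1] + mode (the virtual -1 plays the sentinel's role).
--     ext = [-1] + list(mode)
--     runs = []
--     i = 0
--     while i < len(ext):
--         j = i
--         while j < len(ext) and ext[j] == ext[i]:
--             j += 1
--         runs.append((ext[i], j - i))
--         i = j
--     # Run starts (shifted by the virtual element) are the switch positions.
--     switch_pos = []
--     value = []
--     pos = runs[0][1] - 1
--     for v, length in runs[1:]:
--         switch_pos.append(pos)
--         value.append(v)
--         pos += length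
--     switch_pos.append(n - 1)
--     return switch_pos, value
-- ===== Notes on version B (the rewrite author's own statement) =====
-- stated objective: alternative
-- what changed: Replaces A's single stateful scan (currentValue sentinel, appending inside the loop) by a staged pipeline: run-length encode [-1]+mode into (value, length) pairs with a nested two-pointer scan, then derive switch positions as cumulative run starts shifted by the virtual sentinel element.
-- outside the precondition, e.g. on _calcBackground([5]): A returns (0, [5]), B returns (0, [5]); on _calcBackground([-1]): A returns (0, [-1]), B returns (0, [-1])
import Mathlib
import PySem

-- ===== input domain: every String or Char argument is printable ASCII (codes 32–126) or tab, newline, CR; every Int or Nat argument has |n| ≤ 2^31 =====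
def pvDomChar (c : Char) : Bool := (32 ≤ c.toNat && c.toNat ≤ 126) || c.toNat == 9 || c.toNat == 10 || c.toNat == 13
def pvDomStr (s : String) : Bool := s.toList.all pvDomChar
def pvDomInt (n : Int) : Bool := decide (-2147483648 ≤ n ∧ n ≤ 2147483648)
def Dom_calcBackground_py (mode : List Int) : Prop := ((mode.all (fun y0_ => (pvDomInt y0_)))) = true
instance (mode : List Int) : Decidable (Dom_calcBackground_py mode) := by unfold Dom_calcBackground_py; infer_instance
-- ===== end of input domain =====

-- B replaces A's stateful sentinel loop by run-length encoding of [-1]+mode and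
-- reading switch positions off the runs' cumulative lengths; objective: alternative.


-- ===== PORT A =====
-- Transliteration of A's loop: state (currentValue, switch_pos, value) folded
-- over range(numberOfSamples).  The 'len == 1' branch returns Python's (0, mode),
-- an int paired with a list, which has no value of the declared type
-- List Int × List Int; Pre_ excludes it, and the port returns ([0], mode) there.
def pvStepA (mode : List Int) (st : Int × List Int × List Int) (a : Int) : Int × List Int × List Int :=
  let m := PySem.List.pyGetD mode a 0
  if m ≠ st.1 then (m, st.2.1 ++ [a], st.2.2 ++ [m]) else st

def calcBackground_py (mode : List Int) : List Int × List Int :=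
  let numberOfSamples : Int := mode.length
  if numberOfSamples = 1 then ([0], mode)
  else
    let st := (PySem.List.pyRange 0 numberOfSamples 1).foldl (pvStepA mode) (-1, [], [])
    (st.2.1 ++ [numberOfSamples - 1], st.2.2)

-- ===== PORT B =====
-- Source B's inner while loop: count of the leading elements equal to v, and the rest.
def pvScanRun (v : Int) : List Int → Nat × List Int
  | [] => (0, [])
  | x :: xs => if x = v then ((pvScanRun v xs).1 + 1, (pvScanRun v xs).2) else (0, x :: xs)

theorem pvScanRun_length_le (v : Int) : ∀ xs : List Int, (pvScanRun v xs).2.length ≤ xs.length := by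
  intro xs
  induction xs with
  | nil => simp [pvScanRun]
  | cons x xs ih =>
      simp only [pvScanRun]
      split
      · exact Nat.le_succ_of_le ih
      · simp

-- Source B's outer while loop: run-length encoding as a list of (value, length) pairs.
def pvRuns : List Int → List (Int × Int)
  | [] => []
  | x :: xs => (x, ((pvScanRun x xs).1 : Int) + 1) :: pvRuns (pvScanRun x xs).2
  termination_by xs => xs.length
  decreasing_by
    simpa using Nat.lt_succ_of_le (pvScanRun_length_le x xs)

-- Source B's for loop over runs[1:]: state (pos, switch_pos, value).
def pvStepB (st : Int × List Int × List Int) (r : Int × Int) : Int × List Int × List Int :=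
  (st.1 + r.2, st.2.1 ++ [st.1], st.2.2 ++ [r.1])

-- Transliteration of Source B: RLE of -1 :: mode, then positions from run lengths.
def calcBackground_py_alt (mode : List Int) : List Int × List Int :=
  let n : Int := mode.length
  if n = 1 then ([0], mode)
  else
    match pvRuns (-1 :: mode) with
    | [] => ([n - 1], [])   -- unreachable: -1 :: mode is nonempty (totality guard only)
    | (_, L0) :: rest =>
        let st := rest.foldl pvStepB (L0 - 1, [], [])
        (st.2.1 ++ [n - 1], st.2.2)

-- ===== PRECONDITION & SPEC =====
-- Pre_ excludes single-element lists: there Python A returns (0, mode), an int in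
-- the first component, which is not a value of the declared type List Int × List Int.
def Pre_calcBackground_py (mode : List Int) : Prop := mode.length ≠ 1
instance (mode : List Int) : Decidable (Pre_calcBackground_py mode) := by unfold Pre_calcBackground_py; infer_instance
def pvWitness_calcBackground_py : List Int := [-1, 2, 2, 3]

def Spec_calcBackground_py (mode : List Int) (out : List Int × List Int) : Prop := out = calcBackground_py_alt mode
instance (mode : List Int) (out : List Int × List Int) : Decidable (Spec_calcBackground_py mode out) := by unfold Spec_calcBackground_py; infer_instance

-- ===== CLAIM (what is proved, stated in full; the proofs are below) =====
def Claim_equal_calcBackground_py : Prop := ∀ (mode : List Int), Dom_calcBackground_py mode → Pre_calcBackground_py mode → Spec_calcBackground_py mode (calcBackground_py mode)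

-- ===== LEMMAS AND PROOFS =====

-- A's loop body, seen on an (index, element) pair.
def pvG (st : Int × List Int × List Int) (p : Int × Int) : Int × List Int × List Int :=
  if p.2 ≠ st.1 then (p.2, st.2.1 ++ [p.1], st.2.2 ++ [p.2]) else st

theorem pvScanRun_decomp (v : Int) : ∀ xs : List Int,
    xs = List.replicate (pvScanRun v xs).1 v ++ (pvScanRun v xs).2 := by
  intro xs
  induction xs with
  | nil => simp [pvScanRun]
  | cons x xs ih =>
      simp only [pvScanRun]
      split
      · next h => simp [List.replicate_succ, h, ← ih]
      · simp

theorem pvScanRun_head_ne (v x : Int) (r : List Int) :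
    ∀ xs : List Int, (pvScanRun v xs).2 = x :: r → x ≠ v := by
  intro xs
  induction xs with
  | nil => simp [pvScanRun]
  | cons y ys ih =>
      simp only [pvScanRun]
      split
      · exact ih
      · next h => intro he; cases he; exact h

-- A's loop ignores a block of elements equal to currentValue.
theorem pvG_replicate (cv : Int) (c : Nat) : ∀ (s : Int) (sp v : List Int),
    (PySem.List.enumerate (List.replicate c cv) s).foldl pvG (cv, sp, v) = (cv, sp, v) := by
  induction c with
  | zero => intro s sp v; simp [PySem.List.enumerate_nil]
  | succ c ih =>
      intro s sp v
      rw [List.replicate_succ, PySem.List.enumerate_cons, List.foldl_cons]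
      have : pvG (cv, sp, v) (s, cv) = (cv, sp, v) := by simp [pvG]
      rw [this, ih]

-- MAIN INVARIANT: A's loop from state (cv, sp, v) over the enumerated rest equals
-- B's run fold over the runs of (cv :: rest), with pos starting at the first switch.
theorem pv_main : ∀ (N : Nat) (xs : List Int), xs.length ≤ N → ∀ (cv s : Int) (sp v : List Int),
    ((PySem.List.enumerate xs s).foldl pvG (cv, sp, v)).2
      = ((pvRuns (pvScanRun cv xs).2).foldl pvStepB (s + (pvScanRun cv xs).1, sp, v)).2 := by
  intro N
  induction N with
  | zero =>
      intro xs h cv s sp v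
      have hx : xs = [] := List.eq_nil_of_length_eq_zero (Nat.le_zero.mp h)
      subst hx
      simp [PySem.List.enumerate_nil, pvScanRun, pvRuns]
  | succ N ih =>
      intro xs h cv s sp v
      obtain ⟨c, r, hcr⟩ : ∃ c r, pvScanRun cv xs = (c, r) := ⟨_, _, rfl⟩
      have hd := pvScanRun_decomp cv xs
      rw [hcr] at hd ⊢
      simp only []
      -- split the enumerated list at the end of the leading run
      rw [hd, PySem.List.enumerate_append, List.foldl_append, pvG_replicate]
      simp only [List.length_replicate]
      cases r with
      | nil => simp [PySem.List.enumerate_nil, pvRuns]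
      | cons x r' =>
          have hxne : x ≠ cv := pvScanRun_head_ne cv x r' xs (by rw [hcr])
          rw [PySem.List.enumerate_cons, List.foldl_cons]
          have hg : pvG (cv, sp, v) (s + (c : Int), x) = (x, sp ++ [s + (c : Int)], v ++ [x]) := by
            simp [pvG, hxne]
          rw [hg]
          have hlen : r'.length ≤ N := by
            have := congrArg List.length hd
            simp at this
            omega
          rw [ih r' hlen x (s + (c : Int) + 1) (sp ++ [s + (c : Int)]) (v ++ [x])]
          obtain ⟨c', r'', hcr'⟩ : ∃ c' r'', pvScanRun x r' = (c', r'') := ⟨_, _, rfl⟩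
          rw [show pvRuns (x :: r') = (x, ((pvScanRun x r').1 : Int) + 1) :: pvRuns (pvScanRun x r').2 from by rw [pvRuns]]
          rw [hcr', List.foldl_cons]
          have hb : pvStepB (s + (c : Int), sp, v) (x, (c' : Int) + 1)
              = (s + (c : Int) + ((c' : Int) + 1), sp ++ [s + (c : Int)], v ++ [x]) := rfl
          rw [hb]
          have hpos : (s + (c : Int)) + ((c' : Int) + 1) = s + (c : Int) + 1 + (c' : Int) := by ring
          rw [hpos]

-- ===== VERDICT (by name: the statement is the Claim_ definition above) =====
theorem calcBackground_py_spec : Claim_equal_calcBackground_py := by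
  intro mode _ hpre
  unfold Spec_calcBackground_py calcBackground_py calcBackground_py_alt
  have hne : ¬ ((mode.length : Int) = 1) := by exact_mod_cast hpre
  simp only [hne, ite_false]
  -- A's index fold is the fold of pvG over the enumerated list
  have hmap : (PySem.List.pyRange 0 (mode.length : Int) 1).foldl (pvStepA mode) (-1, [], [])
      = (PySem.List.enumerate mode 0).foldl pvG (-1, [], []) := by
    rw [PySem.List.enumerate_eq_map_pyRange (d := 0), List.foldl_map]
    rfl
  rw [hmap]
  obtain ⟨c, r, hcr⟩ : ∃ c r, pvScanRun (-1 : Int) mode = (c, r) := ⟨_, _, rfl⟩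
  have hmain := pv_main mode.length mode (le_refl _) (-1) 0 [] []
  rw [hcr] at hmain
  simp only [] at hmain
  rw [show pvRuns (-1 :: mode) = ((-1 : Int), ((pvScanRun (-1 : Int) mode).1 : Int) + 1) :: pvRuns (pvScanRun (-1 : Int) mode).2 from by rw [pvRuns]]
  rw [hcr]
  simp only [add_sub_cancel_right]
  have hz : (0 : Int) + (c : Int) = (c : Int) := by ring
  rw [hz] at hmain
  exact congrArg (fun p => (p.1 ++ [(mode.length : Int) - 1], p.2)) hmain
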